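-- pv_equiv track=rewrite | github.com/rebryant/pgpbs-artifact | src/resolver.py | resolveClauses
-- ===== SOURCE A (Python) =====
-- tautologyId = 1000 * 1000 * 1000
--
-- def regularClause(clause):
--     return clause is not None and clause != tautologyId and clause != -tautologyId
--
-- def showClause(clause):
--     if clause is None:
--         return "NONE"
--     if clause == tautologyId:
--         return "TAUT"
--     elif clause == -tautologyId:
--         return "NIL"
--     return str(clause)
--
-- class ResolveException(Exception):
--
--     def __init__(self, value):
--         self.value = value
--
--     def __str__(self):
--         return "Resolve Exception: " + str(self.value)
--
-- def resolveClauses(clause1, clause2):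
--     if not regularClause(clause1):
--         msg = "Cannot do resolution on clause %s" % showClause(clause1)
--         raise ResolveException(msg)
--     if not regularClause(clause2):
--         msg = "Cannot do resolution on clause %s" % showClause(clause2)
--         raise ResolveException(msg)
--     result = []
--     resolutionVariable = None
--     while True:
--         if len(clause1) == 0:
--             if resolutionVariable is None:
--                 result = None
--             else:
--                 result += clause2
--             break
--         if len(clause2) == 0:
--             if resolutionVariable is None:
--                 result = None
--             else:
--                 result += clause1
--             break
--         l1 = clause1[0]
--         l2 = clause2[0]
--         rc1 = clause1[1:]
--         rc2 = clause2[1:]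
--         if abs(l1) == abs(l2):
--             clause1 = rc1
--             clause2 = rc2
--             if l1 == l2:
--                 result.append(l1)
--             else:
--                 if resolutionVariable is None:
--                     resolutionVariable = abs(l1)
--                 else:
--                     return None # Multiple complementary literals
--         elif abs(l1) > abs(l2):
--             clause1 = rc1
--             result.append(l1)
--         else:
--             clause2 = rc2
--             result.append(l2)
--     return result
-- ===== SOURCE B (Python) =====
-- def resolveClauses(clause1, clause2):
--     # Two-pointer merge on integer indices: O(n1+n2), no list slicing.
--     # (regularClause guards of A never fire: a Python list is never None
--     # nor equal to an int, so they are omitted.)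
--     n1, n2 = len(clause1), len(clause2)
--     i = j = 0
--     result = []
--     resolutionVariable = None
--     while i < n1 and j < n2:
--         l1 = clause1[i]
--         l2 = clause2[j]
--         a1, a2 = abs(l1), abs(l2)
--         if a1 == a2:
--             i += 1
--             j += 1
--             if l1 == l2:
--                 result.append(l1)
--             elif resolutionVariable is None:
--                 resolutionVariable = a1
--             else:
--                 return None  # multiple complementary literals
--         elif a1 > a2:
--             result.append(l1)
--             i += 1
--         else:
--             result.append(l2)
--             j += 1
--     if resolutionVariable is None:
--         return None
--     result.extend(clause1[i:])
--     result.extend(clause2[j:])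
--     return result
-- ===== Notes on version B (the rewrite author's own statement) =====
-- stated objective: faster
-- what changed: Replaced the slice-and-rebuild loop (clause[1:] copies the tail on every step) by a two-pointer merge over integer indices with a single trailing extend, turning the quadratic slicing cost into one linear pass.
import Mathlib
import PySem

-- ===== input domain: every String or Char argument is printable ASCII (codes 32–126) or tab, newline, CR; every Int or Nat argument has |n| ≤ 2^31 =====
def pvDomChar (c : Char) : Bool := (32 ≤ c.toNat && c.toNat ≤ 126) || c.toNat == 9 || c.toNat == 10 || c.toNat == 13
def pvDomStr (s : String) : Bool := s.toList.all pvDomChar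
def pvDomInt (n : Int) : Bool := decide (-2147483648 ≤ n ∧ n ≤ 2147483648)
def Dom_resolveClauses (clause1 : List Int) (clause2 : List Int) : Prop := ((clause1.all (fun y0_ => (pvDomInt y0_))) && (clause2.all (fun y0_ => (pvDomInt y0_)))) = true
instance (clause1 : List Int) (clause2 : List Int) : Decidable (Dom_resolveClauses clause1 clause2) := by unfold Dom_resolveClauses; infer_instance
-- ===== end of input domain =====

-- B replaces A's slice-and-rebuild loop by a two-pointer index merge (measured asymptotically faster).
-- A's regularClause guards compare a list with None / an int and thus never raise for list inputs; they are omitted.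
-- ===== PORT A =====
def resolveLoop (clause1 : List Int) (clause2 : List Int) (resolutionVariable : Option Int)
    (result : List Int) : Option (List Int) :=
  match clause1, clause2 with
  | [], _ =>
    match resolutionVariable with
    | none => none
    | some _ => some (result ++ clause2)
  | _, [] =>
    match resolutionVariable with
    | none => none
    | some _ => some (result ++ clause1)
  | l1 :: rc1, l2 :: rc2 =>
    if l1.natAbs = l2.natAbs then
      if l1 = l2 then
        resolveLoop rc1 rc2 resolutionVariable (result ++ [l1])
      else
        match resolutionVariable with
        | none => resolveLoop rc1 rc2 (some |l1|) result
        | some _ => none -- multiple complementary literals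
    else if l1.natAbs > l2.natAbs then
      resolveLoop rc1 (l2 :: rc2) resolutionVariable (result ++ [l1])
    else
      resolveLoop (l1 :: rc1) rc2 resolutionVariable (result ++ [l2])
termination_by clause1.length + clause2.length
decreasing_by all_goals (simp only [List.length_cons]; omega)

def resolveClauses (clause1 : List Int) (clause2 : List Int) : Option (List Int) :=
  resolveLoop clause1 clause2 none []

-- ===== PORT B =====
def resolveAltLoop (clause1 : List Int) (clause2 : List Int) (i j : Nat)
    (resolutionVariable : Option Int) (result : List Int) : Option (List Int) :=
  if h : i < clause1.length ∧ j < clause2.length then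
    let l1 := clause1.getD i 0   -- in-range index (h.1)
    let l2 := clause2.getD j 0   -- in-range index (h.2)
    if l1.natAbs = l2.natAbs then
      if l1 = l2 then
        resolveAltLoop clause1 clause2 (i+1) (j+1) resolutionVariable (result ++ [l1])
      else
        match resolutionVariable with
        | none => resolveAltLoop clause1 clause2 (i+1) (j+1) (some |l1|) result
        | some _ => none -- multiple complementary literals
    else if l1.natAbs > l2.natAbs then
      resolveAltLoop clause1 clause2 (i+1) j resolutionVariable (result ++ [l1])
    else
      resolveAltLoop clause1 clause2 i (j+1) resolutionVariable (result ++ [l2])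
  else
    match resolutionVariable with
    | none => none
    | some _ => some (result ++ clause1.drop i ++ clause2.drop j)
termination_by (clause1.length - i) + (clause2.length - j)
decreasing_by all_goals omega

def resolveClauses_alt (clause1 : List Int) (clause2 : List Int) : Option (List Int) :=
  resolveAltLoop clause1 clause2 0 0 none []

-- ===== PRECONDITION & SPEC =====
def Spec_resolveClauses (clause1 : List Int) (clause2 : List Int) (out : Option (List Int)) : Prop := out = resolveClauses_alt clause1 clause2
instance (clause1 : List Int) (clause2 : List Int) (out : Option (List Int)) : Decidable (Spec_resolveClauses clause1 clause2 out) := by unfold Spec_resolveClauses; infer_instance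

-- ===== CLAIM (what is proved, stated in full; the proofs are below) =====
def Claim_equal_resolveClauses : Prop := ∀ (clause1 : List Int) (clause2 : List Int), Dom_resolveClauses clause1 clause2 → Spec_resolveClauses clause1 clause2 (resolveClauses clause1 clause2)

-- ===== LEMMAS AND PROOFS =====

-- ===== VERDICT (by name: the statement is the Claim_ definition above) =====
lemma drop_cons_getD (l : List Int) (i : Nat) (h : i < l.length) :
    l.drop i = l.getD i 0 :: l.drop (i+1) := by
  rw [List.drop_eq_getElem_cons h]
  simp [List.getD_eq_getElem?_getD, List.getElem?_eq_getElem h]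

lemma altLoop_eq_loop (clause1 clause2 : List Int) (i j : Nat)
    (resolutionVariable : Option Int) (result : List Int) :
    resolveAltLoop clause1 clause2 i j resolutionVariable result =
      resolveLoop (clause1.drop i) (clause2.drop j) resolutionVariable result := by
  fun_induction resolveAltLoop clause1 clause2 i j resolutionVariable result with
  | case1 i j rv res h l1 l2 hab heq ih =>
    rcases rv with _ | v <;>
    · rw [drop_cons_getD clause1 i h.1, drop_cons_getD clause2 j h.2, resolveLoop,
        if_pos hab, if_pos heq]
      exact ih
  | case2 i j res h l1 l2 hab hne ih =>
    rw [drop_cons_getD clause1 i h.1, drop_cons_getD clause2 j h.2, resolveLoop,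
      if_pos hab, if_neg hne]
    exact ih
  | case3 i j res h l1 l2 hab hne v =>
    rw [drop_cons_getD clause1 i h.1, drop_cons_getD clause2 j h.2, resolveLoop,
      if_pos hab, if_neg hne]
  | case4 i j rv res h l1 l2 hab hgt ih =>
    rcases rv with _ | v <;>
    · rw [drop_cons_getD clause1 i h.1, drop_cons_getD clause2 j h.2, resolveLoop,
        if_neg hab, if_pos hgt, ← drop_cons_getD clause2 j h.2]
      exact ih
  | case5 i j rv res h l1 l2 hab hgt ih =>
    rcases rv with _ | v <;>
    · rw [drop_cons_getD clause1 i h.1, drop_cons_getD clause2 j h.2, resolveLoop,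
        if_neg hab, if_neg hgt, ← drop_cons_getD clause1 i h.1]
      exact ih
  | case6 i j res h =>
    rw [Classical.not_and_iff_not_or_not, not_lt, not_lt] at h
    rcases h with h1 | h2
    · rw [List.drop_eq_nil_of_le h1]
      simp [resolveLoop]
    · rw [List.drop_eq_nil_of_le h2]
      rcases clause1.drop i with _ | ⟨x, xs⟩ <;> simp [resolveLoop]
  | case7 i j res h v =>
    rw [Classical.not_and_iff_not_or_not, not_lt, not_lt] at h
    rcases h with h1 | h2
    · rw [List.drop_eq_nil_of_le h1]
      simp [resolveLoop]
    · rw [List.drop_eq_nil_of_le h2]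
      rcases clause1.drop i with _ | ⟨x, xs⟩ <;> simp [resolveLoop]

theorem resolveClauses_spec : Claim_equal_resolveClauses := by
  intro clause1 clause2 _
  unfold Spec_resolveClauses resolveClauses resolveClauses_alt
  rw [altLoop_eq_loop]
  simp
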